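-- pv_equiv track=rewrite | github.com/MFDI-hub/omniproxy | omniproxy/extended_proxy.py | _classify_anonymity
-- ===== SOURCE A (Python) =====
-- from collections.abc import Mapping
--
-- def _classify_anonymity(headers: Mapping[str, str]) -> str:
--     """Infer anonymity tier from response headers (transparent / anonymous / elite).
--
--     Args:
--         headers (Mapping[str, str]): Normalised header names to values.
--
--     Returns:
--         str: ``"transparent"``, ``"anonymous"``, or ``"elite"``.
--
--     Example:
--         >>> _classify_anonymity({"X-Forwarded-For": "1.2.3.4"})
--         'transparent'
--     """
--     for leak in ("x-forwarded-for", "via", "forwarded"):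
--         for k, v in headers.items():
--             if k.lower() == leak and str(v or "").strip():
--                 return "transparent"
--     for k in headers:
--         if k.lower() == "proxy-connection":
--             return "anonymous"
--     return "elite"
-- ===== SOURCE B (Python) =====
-- def _classify_anonymity(headers):
--     leak = False
--     proxy = False
--     for k, v in headers.items():
--         kl = k.lower()
--         leak = leak or (kl in ("x-forwarded-for", "via", "forwarded")
--                         and bool(str(v or "").strip()))
--         proxy = proxy or kl == "proxy-connection"
--     return "transparent" if leak else "anonymous" if proxy else "elite"
-- ===== Notes on version B (the rewrite author's own statement) =====
-- stated objective: simpler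
-- what changed: Replaces A's three priority scans over headers (one per leak header) plus a fourth proxy-connection scan with a single pass that ORs two boolean flags and resolves priority once at the end.
import Mathlib
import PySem

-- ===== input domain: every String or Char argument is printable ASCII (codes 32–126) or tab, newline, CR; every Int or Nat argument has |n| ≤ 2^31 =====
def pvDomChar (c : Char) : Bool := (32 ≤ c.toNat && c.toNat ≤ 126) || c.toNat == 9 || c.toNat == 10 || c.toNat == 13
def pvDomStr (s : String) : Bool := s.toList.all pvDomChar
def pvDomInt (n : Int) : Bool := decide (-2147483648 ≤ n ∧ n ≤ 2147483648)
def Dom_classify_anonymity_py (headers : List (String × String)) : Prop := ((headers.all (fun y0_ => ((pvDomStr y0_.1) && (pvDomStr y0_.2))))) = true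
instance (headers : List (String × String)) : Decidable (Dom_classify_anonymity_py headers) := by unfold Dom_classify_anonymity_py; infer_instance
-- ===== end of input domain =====

-- B replaces A's three priority scans plus a proxy-connection scan with one pass ORing two flags; priority resolved once at the end (simpler).
-- ===== PORT A =====
def pvScanLeak (leak : String) : List (String × String) → Bool
  | [] => false
  | (k, v) :: t =>
    if PySem.Str.lower k == leak && !(PySem.Str.strip (if v == "" then "" else v) == "") then
      true
    else pvScanLeak leak t

def pvLoopLeaks (headers : List (String × String)) : List String → Bool
  | [] => false
  | l :: ls => if pvScanLeak l headers then true else pvLoopLeaks headers ls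

def pvProxyScan : List (String × String) → Bool
  | [] => false
  | (k, _) :: t => if PySem.Str.lower k == "proxy-connection" then true else pvProxyScan t

def classify_anonymity_py (headers : List (String × String)) : String :=
  if pvLoopLeaks headers ["x-forwarded-for", "via", "forwarded"] then "transparent"
  else if pvProxyScan headers then "anonymous"
  else "elite"

-- ===== PORT B =====
def pvStep (acc : Bool × Bool) (kv : String × String) : Bool × Bool :=
  let kl := PySem.Str.lower kv.1
  ( acc.1 || ((kl == "x-forwarded-for" || kl == "via" || kl == "forwarded")
        && !(PySem.Str.strip (if kv.2 == "" then "" else kv.2) == "")),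
    acc.2 || (kl == "proxy-connection") )

def classify_anonymity_py_alt (headers : List (String × String)) : String :=
  let fl := headers.foldl pvStep (false, false)
  if fl.1 then "transparent" else if fl.2 then "anonymous" else "elite"

-- ===== PRECONDITION & SPEC =====
def Spec_classify_anonymity_py (headers : List (String × String)) (out : String) : Prop := out = classify_anonymity_py_alt headers
instance (headers : List (String × String)) (out : String) : Decidable (Spec_classify_anonymity_py headers out) := by unfold Spec_classify_anonymity_py; infer_instance

-- ===== CLAIM (what is proved, stated in full; the proofs are below) =====
def Claim_equal_classify_anonymity_py : Prop := ∀ (headers : List (String × String)), Dom_classify_anonymity_py headers → Spec_classify_anonymity_py headers (classify_anonymity_py headers)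

-- ===== LEMMAS AND PROOFS =====
theorem pvOrEmpty (v : String) : (if v == "" then "" else v) = v := by
  by_cases h : v = "" <;> simp [h]

def pvLeakPred (kv : String × String) : Bool :=
  let kl := PySem.Str.lower kv.1
  (kl == "x-forwarded-for" || kl == "via" || kl == "forwarded")
    && !(PySem.Str.strip kv.2 == "")

theorem pvScanLeak_any (leak : String) (hs : List (String × String)) :
    pvScanLeak leak hs =
      hs.any (fun kv => PySem.Str.lower kv.1 == leak && !(PySem.Str.strip kv.2 == "")) := by
  induction hs with
  | nil => rfl
  | cons h t ih =>
    obtain ⟨k, v⟩ := h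
    simp only [pvScanLeak, pvOrEmpty, List.any_cons]
    cases hcb : (PySem.Str.lower k == leak && !(PySem.Str.strip v == "")) <;>
      simp [hcb, ih]

theorem pvProxyScan_any (hs : List (String × String)) :
    pvProxyScan hs = hs.any (fun kv => PySem.Str.lower kv.1 == "proxy-connection") := by
  induction hs with
  | nil => rfl
  | cons h t ih =>
    obtain ⟨k, v⟩ := h
    simp only [pvProxyScan, List.any_cons]
    cases hcb : (PySem.Str.lower k == "proxy-connection") <;> simp [hcb, ih]

theorem pvFold_spec (hs : List (String × String)) (a b : Bool) :
    hs.foldl pvStep (a, b) =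
      (a || hs.any pvLeakPred,
       b || hs.any (fun kv => PySem.Str.lower kv.1 == "proxy-connection")) := by
  induction hs generalizing a b with
  | nil => simp
  | cons h t ih =>
    simp only [List.foldl_cons, List.any_cons, pvStep, pvOrEmpty, ih]
    simp [Prod.ext_iff, pvLeakPred, Bool.or_assoc]

theorem pvAny_leak_split (hs : List (String × String)) :
    hs.any pvLeakPred =
      (hs.any (fun kv => PySem.Str.lower kv.1 == "x-forwarded-for"
          && !(PySem.Str.strip kv.2 == ""))
       || hs.any (fun kv => PySem.Str.lower kv.1 == "via"
          && !(PySem.Str.strip kv.2 == ""))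
       || hs.any (fun kv => PySem.Str.lower kv.1 == "forwarded"
          && !(PySem.Str.strip kv.2 == ""))) := by
  induction hs with
  | nil => rfl
  | cons h t ih =>
    simp only [List.any_cons, ih, pvLeakPred]
    cases PySem.Str.lower h.1 == "x-forwarded-for" <;>
      cases PySem.Str.lower h.1 == "via" <;>
      cases PySem.Str.lower h.1 == "forwarded" <;>
      cases (PySem.Str.strip h.2 == "") <;> simp

-- ===== VERDICT (by name: the statement is the Claim_ definition above) =====
theorem classify_anonymity_py_spec : Claim_equal_classify_anonymity_py := by
  intro headers _
  unfold Spec_classify_anonymity_py classify_anonymity_py classify_anonymity_py_alt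
  simp only [pvLoopLeaks, pvFold_spec, pvScanLeak_any, pvProxyScan_any, pvAny_leak_split,
    Bool.false_or]
  cases headers.any (fun kv => PySem.Str.lower kv.1 == "x-forwarded-for"
      && !(PySem.Str.strip kv.2 == "")) <;>
    cases headers.any (fun kv => PySem.Str.lower kv.1 == "via"
      && !(PySem.Str.strip kv.2 == "")) <;>
    cases headers.any (fun kv => PySem.Str.lower kv.1 == "forwarded"
      && !(PySem.Str.strip kv.2 == "")) <;>
    cases headers.any (fun kv => PySem.Str.lower kv.1 == "proxy-connection") <;> simp
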